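-- pv_equiv track=rewrite | github.com/miguel6298/Python_code | Bioinf/ejercicios_cortos/Ej11_Funciones.py | cuenta_mutaciones
-- ===== SOURCE A (Python) =====
-- def cuenta_mutaciones(s1,s2):
--     s1 = s1.upper()
--     s2 = s2.upper()
--     dicc_mut = {"A->T": 0,
--                 "A->G": 0,
--                 "A->C": 0,
--                 "T->A": 0,
--                 "T->G": 0,
--                 "T->C": 0,
--                 "G->A": 0,
--                 "G->T": 0,
--                 "G->C": 0,
--                 "C->A": 0,
--                 "C->T": 0,
--                 "C->G": 0}
--     for i,j in zip(s1,s2):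
--         if i == "A":
--             if j == "T":
--                 dicc_mut ["A->T"] += 1
--             if j == "G":
--                 dicc_mut ["A->G"] += 1
--             if j == "C":
--                 dicc_mut ["A->C"] += 1
--         elif i == "T":
--              if j == "A":
--                 dicc_mut ["T->A"] += 1
--              if j == "G":
--                 dicc_mut ["T->G"] += 1
--              if j == "C":
--                 dicc_mut ["T->C"] += 1
--         elif i == "G":
--              if j == "A":
--                 dicc_mut ["G->A"] += 1
--              if j == "T":
--                 dicc_mut ["G->T"] += 1
--              if j == "C":
--                 dicc_mut ["G->C"] += 1
--         elif i == "C":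
--              if j == "A":
--                 dicc_mut ["C->A"] += 1
--              if j == "T":
--                 dicc_mut ["C->T"] += 1
--              if j == "G":
--                 dicc_mut ["C->G"] += 1
--     return dicc_mut
-- ===== SOURCE B (Python) =====
-- def cuenta_mutaciones(s1, s2):
--     pairs = list(zip(s1.upper(), s2.upper()))
--     return {a + "->" + b: pairs.count((a, b)) for a in "ATGC" for b in "ATGC" if a != b}
-- ===== Notes on version B (the rewrite author's own statement) =====
-- stated objective: simpler
-- what changed: Instead of one pass over the sequences with a mutating counter dict and a 12-way nested if/elif dispatch, B materializes the zipped pair list once and builds the result dict directly in key order by counting each of the 12 base pairs with pairs.count; the result dict is never mutated and there is no per-character dispatch.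
import Mathlib
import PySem

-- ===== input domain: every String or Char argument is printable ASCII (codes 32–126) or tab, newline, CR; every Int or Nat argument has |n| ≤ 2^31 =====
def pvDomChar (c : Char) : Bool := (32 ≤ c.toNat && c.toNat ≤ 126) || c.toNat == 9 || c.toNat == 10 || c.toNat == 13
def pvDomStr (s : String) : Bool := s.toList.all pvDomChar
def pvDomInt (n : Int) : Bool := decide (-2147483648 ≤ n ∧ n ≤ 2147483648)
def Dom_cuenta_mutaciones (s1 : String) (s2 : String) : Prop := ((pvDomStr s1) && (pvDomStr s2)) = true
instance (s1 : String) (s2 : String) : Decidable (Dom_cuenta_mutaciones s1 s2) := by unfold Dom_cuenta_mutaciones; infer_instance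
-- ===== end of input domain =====

-- B drops A's mutating counter dict with its 12-way nested if/elif dispatch: it materializes the
-- zipped pair list once and builds the result directly, counting each of the 12 base pairs with
-- pairs.count — simpler, same behaviour.

-- ===== PORT A =====
def pvInitA : PySem.Dict String Int :=
  PySem.Dict.ofList [("A->T", 0), ("A->G", 0), ("A->C", 0),
                     ("T->A", 0), ("T->G", 0), ("T->C", 0),
                     ("G->A", 0), ("G->T", 0), ("G->C", 0),
                     ("C->A", 0), ("C->T", 0), ("C->G", 0)]

-- one iteration of A's loop body (the nested if/elif dispatch)
def pvStepA (d : PySem.Dict String Int) (p : Char × Char) : PySem.Dict String Int :=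
  let i := p.1; let j := p.2
  if i = 'A' then
    let d := if j = 'T' then d.modify "A->T" 0 (· + 1) else d
    let d := if j = 'G' then d.modify "A->G" 0 (· + 1) else d
    if j = 'C' then d.modify "A->C" 0 (· + 1) else d
  else if i = 'T' then
    let d := if j = 'A' then d.modify "T->A" 0 (· + 1) else d
    let d := if j = 'G' then d.modify "T->G" 0 (· + 1) else d
    if j = 'C' then d.modify "T->C" 0 (· + 1) else d
  else if i = 'G' then
    let d := if j = 'A' then d.modify "G->A" 0 (· + 1) else d
    let d := if j = 'T' then d.modify "G->T" 0 (· + 1) else d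
    if j = 'C' then d.modify "G->C" 0 (· + 1) else d
  else if i = 'C' then
    let d := if j = 'A' then d.modify "C->A" 0 (· + 1) else d
    let d := if j = 'T' then d.modify "C->T" 0 (· + 1) else d
    if j = 'G' then d.modify "C->G" 0 (· + 1) else d
  else d

def cuenta_mutaciones (s1 : String) (s2 : String) : List (String × Int) :=
  (((PySem.Chars.upper s1.toList).zip (PySem.Chars.upper s2.toList)).foldl pvStepA pvInitA).items

-- ===== PORT B =====
def pvBases : List Char := ['A', 'T', 'G', 'C']

-- a + "->" + b
def pvKey (a : Char) (b : Char) : String := String.ofList [a, '-', '>', b]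

-- the dict comprehension {a+"->"+b: pairs.count((a,b)) for a in "ATGC" for b in "ATGC" if a != b}
def cuenta_mutaciones_alt (s1 : String) (s2 : String) : List (String × Int) :=
  let pairs := (PySem.Chars.upper s1.toList).zip (PySem.Chars.upper s2.toList)
  (PySem.Dict.ofList
    (pvBases.flatMap (fun a =>
      pvBases.filterMap (fun b =>
        if a ≠ b then some (pvKey a b, (pairs.count (a, b) : Int)) else none)))).items

-- ===== PRECONDITION & SPEC =====
def Spec_cuenta_mutaciones (s1 : String) (s2 : String) (out : List (String × Int)) : Prop := out = cuenta_mutaciones_alt s1 s2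
instance (s1 : String) (s2 : String) (out : List (String × Int)) : Decidable (Spec_cuenta_mutaciones s1 s2 out) := by unfold Spec_cuenta_mutaciones; infer_instance

-- ===== CLAIM (what is proved, stated in full; the proofs are below) =====
def Claim_equal_cuenta_mutaciones : Prop := ∀ (s1 : String) (s2 : String), Dom_cuenta_mutaciones s1 s2 → Spec_cuenta_mutaciones s1 s2 (cuenta_mutaciones s1 s2)

-- ===== LEMMAS AND PROOFS =====

def pvKeys12 : List String :=
  ["A->T", "A->G", "A->C", "T->A", "T->G", "T->C",
   "G->A", "G->T", "G->C", "C->A", "C->T", "C->G"]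

-- getD of one A-step at a base-pair key changes exactly when the pair is that key's pair
theorem pvStepA_getD (d : PySem.Dict String Int) (p : Char × Char)
    (a b : Char) (ha : a ∈ pvBases) (hb : b ∈ pvBases) (hne : a ≠ b) :
    (pvStepA d p).getD (pvKey a b) 0 =
      d.getD (pvKey a b) 0 + (if p = (a, b) then 1 else 0) := by
  obtain ⟨i, j⟩ := p
  by_cases hij : i ∈ pvBases ∧ j ∈ pvBases ∧ i ≠ j
  · obtain ⟨hi, hj, hne'⟩ := hij
    fin_cases hi <;> fin_cases hj <;> fin_cases ha <;> fin_cases hb <;>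
      simp_all [pvStepA, pvKey, PySem.Dict.getD_modify]
  · have hpe : ((i, j) : Char × Char) ≠ (a, b) := by
      intro h
      rw [Prod.mk.injEq] at h
      obtain ⟨rfl, rfl⟩ := h
      exact hij ⟨ha, hb, hne⟩
    rw [if_neg hpe, add_zero]
    by_cases hjb : j ∈ pvBases
    · by_cases hib : i ∈ pvBases
      · have : i = j := by by_contra h; exact hij ⟨hib, hjb, h⟩
        subst this
        fin_cases hib <;> simp [pvStepA]
      · simp only [pvBases, List.mem_cons, List.not_mem_nil, or_false, not_or] at hib
        obtain ⟨h1, h2, h3, h4⟩ := hib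
        simp [pvStepA, h1, h2, h3, h4]
    · simp only [pvBases, List.mem_cons, List.not_mem_nil, or_false, not_or] at hjb
      obtain ⟨h1, h2, h3, h4⟩ := hjb
      simp only [pvStepA]
      split_ifs <;> simp_all [pvKey]

-- the value A's loop leaves at a base-pair key is the count of that pair
theorem pvFoldA_getD (l : List (Char × Char)) (d : PySem.Dict String Int)
    (a b : Char) (ha : a ∈ pvBases) (hb : b ∈ pvBases) (hne : a ≠ b) :
    (l.foldl pvStepA d).getD (pvKey a b) 0 =
      d.getD (pvKey a b) 0 + (l.count (a, b) : Int) := by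
  induction l generalizing d with
  | nil => simp
  | cons p l ih =>
    rw [List.foldl_cons, ih (pvStepA d p), pvStepA_getD d p a b ha hb hne,
        List.count_cons]
    by_cases hp : p = (a, b)
    · simp [hp]; ring
    · simp [hp]

theorem pvModify_keys (d : PySem.Dict String Int) (k : String) (f : Int → Int)
    (h : d.contains k = true) : (d.modify k 0 f).keys = d.keys := by
  rw [PySem.Dict.keys_modify]
  exact PySem.Dict.keys_insert_of_contains d _ h

theorem pvStepA_keys (d : PySem.Dict String Int) (hk : d.keys = pvKeys12) (p : Char × Char) :
    (pvStepA d p).keys = pvKeys12 := by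
  have hm : ∀ (k : String), k ∈ pvKeys12 → ∀ d' : PySem.Dict String Int, d'.keys = pvKeys12 →
      (d'.modify k 0 (· + 1)).keys = pvKeys12 := by
    intro k hkm d' hk'
    rw [pvModify_keys _ _ _ (by rw [PySem.Dict.contains_eq_decide_mem_keys, hk']
                                exact decide_eq_true hkm)]
    exact hk'
  obtain ⟨i, j⟩ := p
  simp only [pvStepA]
  split_ifs <;>
    first
      | exact hk
      | exact hm _ (by decide) _ hk
      | exact hm _ (by decide) _ (hm _ (by decide) _ hk)
      | exact hm _ (by decide) _ (hm _ (by decide) _ (hm _ (by decide) _ hk))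

theorem pvFoldA_keys (l : List (Char × Char)) (d : PySem.Dict String Int)
    (hk : d.keys = pvKeys12) : (l.foldl pvStepA d).keys = pvKeys12 := by
  induction l generalizing d with
  | nil => exact hk
  | cons p l ih => exact ih _ (pvStepA_keys d hk p)


-- ===== VERDICT (by name: the statement is the Claim_ definition above) =====
theorem cuenta_mutaciones_spec : Claim_equal_cuenta_mutaciones := by
  intro s1 s2 _
  unfold Spec_cuenta_mutaciones cuenta_mutaciones cuenta_mutaciones_alt
  set l := (PySem.Chars.upper s1.toList).zip (PySem.Chars.upper s2.toList) with hl
  have hkeys : (l.foldl pvStepA pvInitA).keys = pvKeys12 := pvFoldA_keys l _ (by decide)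
  have hnd : (l.foldl pvStepA pvInitA).keys.Nodup := by rw [hkeys]; decide
  rw [PySem.Dict.items_eq_map_keys _ hnd 0, hkeys]
  have hv : ∀ a b, a ∈ pvBases → b ∈ pvBases → a ≠ b →
      (l.foldl pvStepA pvInitA).getD (pvKey a b) 0 = (l.count (a, b) : Int) := by
    intro a b ha hb hne
    rw [pvFoldA_getD l _ a b ha hb hne]
    fin_cases ha <;> fin_cases hb <;> simp_all [pvInitA, pvKey] <;> rfl
  have hAT : (l.foldl pvStepA pvInitA).getD "A->T" 0 = (l.count ('A', 'T') : Int) := hv 'A' 'T' (by decide) (by decide) (by decide)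
  have hAG : (l.foldl pvStepA pvInitA).getD "A->G" 0 = (l.count ('A', 'G') : Int) := hv 'A' 'G' (by decide) (by decide) (by decide)
  have hAC : (l.foldl pvStepA pvInitA).getD "A->C" 0 = (l.count ('A', 'C') : Int) := hv 'A' 'C' (by decide) (by decide) (by decide)
  have hTA : (l.foldl pvStepA pvInitA).getD "T->A" 0 = (l.count ('T', 'A') : Int) := hv 'T' 'A' (by decide) (by decide) (by decide)
  have hTG : (l.foldl pvStepA pvInitA).getD "T->G" 0 = (l.count ('T', 'G') : Int) := hv 'T' 'G' (by decide) (by decide) (by decide)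
  have hTC : (l.foldl pvStepA pvInitA).getD "T->C" 0 = (l.count ('T', 'C') : Int) := hv 'T' 'C' (by decide) (by decide) (by decide)
  have hGA : (l.foldl pvStepA pvInitA).getD "G->A" 0 = (l.count ('G', 'A') : Int) := hv 'G' 'A' (by decide) (by decide) (by decide)
  have hGT : (l.foldl pvStepA pvInitA).getD "G->T" 0 = (l.count ('G', 'T') : Int) := hv 'G' 'T' (by decide) (by decide) (by decide)
  have hGC : (l.foldl pvStepA pvInitA).getD "G->C" 0 = (l.count ('G', 'C') : Int) := hv 'G' 'C' (by decide) (by decide) (by decide)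
  have hCA : (l.foldl pvStepA pvInitA).getD "C->A" 0 = (l.count ('C', 'A') : Int) := hv 'C' 'A' (by decide) (by decide) (by decide)
  have hCT : (l.foldl pvStepA pvInitA).getD "C->T" 0 = (l.count ('C', 'T') : Int) := hv 'C' 'T' (by decide) (by decide) (by decide)
  have hCG : (l.foldl pvStepA pvInitA).getD "C->G" 0 = (l.count ('C', 'G') : Int) := hv 'C' 'G' (by decide) (by decide) (by decide)
  have hL : pvBases.flatMap (fun a => pvBases.filterMap (fun b =>
        if a ≠ b then some (pvKey a b, (l.count (a, b) : Int)) else none))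
      = [("A->T", (l.count ('A', 'T') : Int)), ("A->G", (l.count ('A', 'G') : Int)), ("A->C", (l.count ('A', 'C') : Int)), ("T->A", (l.count ('T', 'A') : Int)), ("T->G", (l.count ('T', 'G') : Int)), ("T->C", (l.count ('T', 'C') : Int)), ("G->A", (l.count ('G', 'A') : Int)), ("G->T", (l.count ('G', 'T') : Int)), ("G->C", (l.count ('G', 'C') : Int)), ("C->A", (l.count ('C', 'A') : Int)), ("C->T", (l.count ('C', 'T') : Int)), ("C->G", (l.count ('C', 'G') : Int))] := rfl
  have hB : (PySem.Dict.ofList [("A->T", (l.count ('A', 'T') : Int)), ("A->G", (l.count ('A', 'G') : Int)), ("A->C", (l.count ('A', 'C') : Int)), ("T->A", (l.count ('T', 'A') : Int)), ("T->G", (l.count ('T', 'G') : Int)), ("T->C", (l.count ('T', 'C') : Int)), ("G->A", (l.count ('G', 'A') : Int)), ("G->T", (l.count ('G', 'T') : Int)), ("G->C", (l.count ('G', 'C') : Int)), ("C->A", (l.count ('C', 'A') : Int)), ("C->T", (l.count ('C', 'T') : Int)), ("C->G", (l.count ('C', 'G') : Int))]).items = [("A->T", (l.count ('A', 'T') : Int)),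 ("A->G", (l.count ('A', 'G') : Int)), ("A->C", (l.count ('A', 'C') : Int)), ("T->A", (l.count ('T', 'A') : Int)), ("T->G", (l.count ('T', 'G') : Int)), ("T->C", (l.count ('T', 'C') : Int)), ("G->A", (l.count ('G', 'A') : Int)), ("G->T", (l.count ('G', 'T') : Int)), ("G->C", (l.count ('G', 'C') : Int)), ("C->A", (l.count ('C', 'A') : Int)), ("C->T", (l.count ('C', 'T') : Int)), ("C->G", (l.count ('C', 'G') : Int))] := by
    simp [PySem.Dict.ofList, PySem.Dict.update, PySem.Dict.insert,
          PySem.Dict.empty, PySem.Dict.contains]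
  dsimp only
  rw [hL, hB]
  simp [pvKeys12, hAT, hAG, hAC, hTA, hTG, hTC, hGA, hGT, hGC, hCA, hCT, hCG]
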